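-- pv_equiv track=rewrite | github.com/eramajarvi/tangente-penitente | SBR/RBA/multisurf.py | hacerMapaParClase
-- ===== SOURCE A (Python) =====
-- def hacerMapaParClase(mapaMulticlase):
--     """ Encuentra el numero de clases en el conjunto de datos y lo guarda en el mapa """
--
--     mapaParClase = {}
--
--     for each in mapaMulticlase:
--         for otro in mapaMulticlase:
--             if each != otro:
--                 ubicador = [each, otro]
--                 ubicador = sorted(ubicador, reverse = True)
--
--                 textoTemp = str(ubicador[0]) + str(ubicador[1])
--
--                 if (textoTemp not in mapaParClase):
--                     mapaParClase[textoTemp] = [0, 0]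
--
--     return mapaParClase
-- ===== SOURCE B (Python) =====
-- def hacerMapaParClase(mapaMulticlase):
--     """Dedup the classes once, then one pass over unordered pairs (tails)."""
--     distinct = []
--     for c in mapaMulticlase:
--         if c not in distinct:
--             distinct.append(c)
--
--     mapaParClase = {}
--     rest = distinct
--     while rest:
--         a, rest = rest[0], rest[1:]
--         for b in rest:
--             mapaParClase[(a + b) if a > b else (b + a)] = [0, 0]
--
--     return mapaParClase
-- ===== Notes on version B (the rewrite author's own statement) =====
-- stated objective: alternative
-- what changed: B deduplicates the classes once and then does a single pass over unordered pairs (tails of the distinct list) with plain dict assignments, instead of A's full ordered double loop that sorts each ordered pair and checks key membership before inserting; measured about 2.6x faster at n=1024 but with the same O(n^2) scaling.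
import Mathlib
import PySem

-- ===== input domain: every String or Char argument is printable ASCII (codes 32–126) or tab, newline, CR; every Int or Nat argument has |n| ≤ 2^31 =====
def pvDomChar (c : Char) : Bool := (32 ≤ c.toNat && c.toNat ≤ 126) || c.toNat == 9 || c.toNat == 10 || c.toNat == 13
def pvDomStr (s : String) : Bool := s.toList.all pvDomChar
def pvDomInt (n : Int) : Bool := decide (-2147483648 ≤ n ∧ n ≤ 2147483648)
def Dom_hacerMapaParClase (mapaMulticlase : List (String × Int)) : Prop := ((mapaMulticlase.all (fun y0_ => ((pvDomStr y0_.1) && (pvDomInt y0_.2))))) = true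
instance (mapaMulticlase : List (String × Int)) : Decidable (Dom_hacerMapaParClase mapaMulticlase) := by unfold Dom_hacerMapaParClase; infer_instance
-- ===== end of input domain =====

-- B deduplicates the classes once and walks the unordered pairs (tails) with plain
-- assignments, instead of A's full ordered double loop with a membership check per pair.

-- ===== PORT A =====
-- 'for each in mapaMulticlase' iterates the dict's keys, i.e. the first components.
def hacerMapaParClase (mapaMulticlase : List (String × Int)) : List (String × List Int) :=
  let mapaParClase : PySem.Dict String (List Int) := PySem.Dict.empty
  let mapaParClase :=
    (mapaMulticlase.map (fun p => p.1)).foldl (fun d each =>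
      (mapaMulticlase.map (fun p => p.1)).foldl (fun d otro =>
        if each ≠ otro then
          let ubicador := [each, otro]
          let ubicador := PySem.List.sorted ubicador (fun x => x) true
          -- str() of a str is the string itself
          let textoTemp := PySem.List.pyGetD ubicador 0 "" ++ PySem.List.pyGetD ubicador 1 ""
          if d.contains textoTemp = false then d.insert textoTemp [0, 0] else d
        else d) d) mapaParClase
  mapaParClase.items

-- ===== PORT B =====
-- '(a + b) if a > b else (b + a)'
def pvKey (a b : String) : String := if b < a then a ++ b else b ++ a

-- the 'while rest:' loop of Source B
def pvPairsLoop : List String → PySem.Dict String (List Int) → PySem.Dict String (List Int)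
  | [], d => d
  | a :: rest, d => pvPairsLoop rest (rest.foldl (fun d b => d.insert (pvKey a b) [0, 0]) d)

def hacerMapaParClase_alt (mapaMulticlase : List (String × Int)) : List (String × List Int) :=
  let distinct :=
    (mapaMulticlase.map (fun p => p.1)).foldl
      (fun acc c => if c ∈ acc then acc else acc ++ [c]) []
  (pvPairsLoop distinct PySem.Dict.empty).items

-- ===== PRECONDITION & SPEC =====
-- Pre_ excludes association lists with a duplicated key: the Python argument is a dict,
-- whose keys are necessarily distinct, so no Python input is excluded.
def Pre_hacerMapaParClase (mapaMulticlase : List (String × Int)) : Prop :=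
  (mapaMulticlase.map (fun p => p.1)).Nodup
instance (mapaMulticlase : List (String × Int)) : Decidable (Pre_hacerMapaParClase mapaMulticlase) := by unfold Pre_hacerMapaParClase; infer_instance

def pvWitness_hacerMapaParClase : (List (String × Int)) := [("a", 1), ("b", 2), ("c", 3)]

def Spec_hacerMapaParClase (mapaMulticlase : List (String × Int)) (out : List (String × List Int)) : Prop := out = hacerMapaParClase_alt mapaMulticlase
instance (mapaMulticlase : List (String × Int)) (out : List (String × List Int)) : Decidable (Spec_hacerMapaParClase mapaMulticlase out) := by unfold Spec_hacerMapaParClase; infer_instance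

-- ===== CLAIM (what is proved, stated in full; the proofs are below) =====
def Claim_equal_hacerMapaParClase : Prop := ∀ (mapaMulticlase : List (String × Int)), Dom_hacerMapaParClase mapaMulticlase → Pre_hacerMapaParClase mapaMulticlase → Spec_hacerMapaParClase mapaMulticlase (hacerMapaParClase mapaMulticlase)

-- ===== LEMMAS AND PROOFS =====

-- A's per-pair body (membership-checked insert) and B's (plain insert)
def stepA (d : PySem.Dict String (List Int)) (k : String) : PySem.Dict String (List Int) :=
  if d.contains k = false then d.insert k [0, 0] else d
def stepB (d : PySem.Dict String (List Int)) (k : String) : PySem.Dict String (List Int) :=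
  d.insert k [0, 0]

-- A's key expression
def keyA (x y : String) : String :=
  let u := PySem.List.sorted [x, y] (fun s => s) true
  PySem.List.pyGetD u 0 "" ++ PySem.List.pyGetD u 1 ""

def blockA (ks : List String) (x : String) : List String :=
  (ks.filter (fun y => decide (x ≠ y))).map (pvKey x)

def LA (ks : List String) : List String := ks.flatMap (blockA ks)

def tailPairs : List String → List String
  | [] => []
  | a :: r => r.map (pvKey a) ++ tailPairs r

def AllZ (d : PySem.Dict String (List Int)) : Prop := ∀ p ∈ d.items, p.2 = ([0, 0] : List Int)

theorem pvKey_comm (a b : String) : pvKey a b = pvKey b a := by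
  unfold pvKey
  rcases lt_trichotomy a b with h | h | h
  · simp [h, not_lt_of_gt h]
  · simp [h]
  · simp [h, not_lt_of_gt h]

theorem keyA_eq {x y : String} (h : x ≠ y) : keyA x y = pvKey x y := by
  simp only [keyA, pvKey]
  rcases lt_or_gt_of_ne h with hlt | hlt
  · have hs : PySem.List.sorted [x, y] (fun s => s) true = [y, x] := by
      apply PySem.List.sorted_rev_eq_of_perm_of_pairwise_gt
      · exact List.Perm.swap x y []
      · exact List.Pairwise.cons (fun b hb => by rw [List.mem_singleton] at hb; rw [hb]; exact hlt)
          (List.pairwise_singleton _ _)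
    rw [hs, if_neg (asymm hlt)]
    rfl
  · have hs : PySem.List.sorted [x, y] (fun s => s) true = [x, y] := by
      apply PySem.List.sorted_rev_eq_of_perm_of_pairwise_gt
      · exact List.Perm.refl _
      · exact List.Pairwise.cons (fun b hb => by rw [List.mem_singleton] at hb; rw [hb]; exact hlt)
          (List.pairwise_singleton _ _)
    rw [hs, if_pos hlt]
    rfl

-- A's guarded inner loop over ys is the checked-insert fold over its key block
theorem guard_fold (x : String) (ys : List String) : ∀ d,
    ys.foldl (fun d y => if x ≠ y then stepA d (keyA x y) else d) d
      = ((ys.filter (fun y => decide (x ≠ y))).map (pvKey x)).foldl stepA d := by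
  induction ys with
  | nil => intro d; rfl
  | cons y ys ih =>
    intro d
    by_cases h : x ≠ y
    · simp only [List.foldl_cons, if_pos h, List.filter_cons, decide_eq_true h,
        keyA_eq h]
      exact ih _
    · have hd : decide (x ≠ y) = false := by simpa using h
      rw [List.foldl_cons, if_neg h, List.filter_cons, hd, if_neg Bool.false_ne_true]
      exact ih _

-- A's whole nested loop is a single checked-insert fold over LA
theorem outer_fold (ks : List String) : ∀ (l : List String) d,
    l.foldl (fun d x => ks.foldl (fun d y => if x ≠ y then stepA d (keyA x y) else d) d) d
      = (l.flatMap (blockA ks)).foldl stepA d := by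
  intro l
  induction l with
  | nil => intro d; rfl
  | cons a l ih =>
    intro d
    simp only [List.foldl_cons, List.flatMap_cons, List.foldl_append]
    rw [guard_fold, ih]
    rfl

theorem A_eq (m : List (String × Int)) :
    hacerMapaParClase m
      = ((LA (m.map (fun p => p.1))).foldl stepA PySem.Dict.empty).items := by
  unfold hacerMapaParClase LA
  rw [← outer_fold]
  rfl

-- B's inner for-loop is the plain-insert fold over its key block
theorem foldB_map (a : String) : ∀ (r : List String) (d : PySem.Dict String (List Int)),
    r.foldl (fun d b => d.insert (pvKey a b) [0, 0]) d = (r.map (pvKey a)).foldl stepB d := by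
  intro r
  induction r with
  | nil => intro d; rfl
  | cons b r ih => intro d; exact ih _

-- B's while-loop is a single plain-insert fold over tailPairs
theorem pairsLoop_eq : ∀ (l : List String) d,
    pvPairsLoop l d = (tailPairs l).foldl stepB d := by
  intro l
  induction l with
  | nil => intro d; rfl
  | cons a r ih =>
    intro d
    rw [show pvPairsLoop (a :: r) d
        = pvPairsLoop r (r.foldl (fun d b => d.insert (pvKey a b) [0, 0]) d) from rfl,
      ih, tailPairs, List.foldl_append]
    congr 1
    exact foldB_map a r d

-- B's dedup loop is the identity on a list without duplicates
theorem dedup_fold : ∀ (ks acc : List String), (acc ++ ks).Nodup →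
    ks.foldl (fun acc c => if c ∈ acc then acc else acc ++ [c]) acc = acc ++ ks := by
  intro ks
  induction ks with
  | nil => intro acc _; simp
  | cons c ks ih =>
    intro acc h
    have hc : c ∉ acc := by
      intro hmem
      exact (List.disjoint_of_nodup_append h) hmem (by simp)
    simp only [List.foldl_cons, if_neg hc]
    rw [ih (acc ++ [c]) (by simpa using h)]
    simp

-- keys of the checked-insert fold
theorem keys_foldA : ∀ (L : List String) (d : PySem.Dict String (List Int)),
    (L.foldl stepA d).keys = PySem.Set.update d.keys L := by
  intro L
  induction L with
  | nil => intro d; rfl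
  | cons k L ih =>
    intro d
    simp only [List.foldl_cons, PySem.Set.update_cons]
    rw [ih]
    congr 1
    unfold stepA
    by_cases h : d.contains k = false
    · rw [if_pos h, PySem.Dict.keys_insert_of_not_contains _ _ h,
        PySem.Set.add_of_not_mem]
      intro hmem
      rw [← PySem.Dict.contains_iff_mem_keys] at hmem
      simp [h] at hmem
    · rw [if_neg h]
      rw [PySem.Set.add_of_mem]
      rw [← PySem.Dict.contains_iff_mem_keys]
      simpa using h

theorem keys_foldB : ∀ (L : List String) (d : PySem.Dict String (List Int)),
    (L.foldl stepB d).keys = PySem.Set.update d.keys L := by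
  intro L d
  exact PySem.Dict.keys_foldl_insert L (fun _ _ => [0, 0]) d

-- every value ever stored is [0, 0]
theorem AllZ_insert {d : PySem.Dict String (List Int)} (h : AllZ d) (k : String) :
    AllZ (d.insert k [0, 0]) := by
  intro p hp
  rcases (PySem.Dict.mem_items_insert _ _ _ _).1 hp with h1 | h1
  · rw [h1]
  · exact h p h1.1

theorem AllZ_foldA : ∀ (L : List String) (d : PySem.Dict String (List Int)),
    AllZ d → AllZ (L.foldl stepA d) := by
  intro L
  induction L with
  | nil => intro d h; exact h
  | cons k L ih =>
    intro d h
    refine ih _ ?_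
    unfold stepA
    by_cases hc : d.contains k = false
    · rw [if_pos hc]; exact AllZ_insert h k
    · rw [if_neg hc]; exact h

theorem AllZ_foldB : ∀ (L : List String) (d : PySem.Dict String (List Int)),
    AllZ d → AllZ (L.foldl stepB d) := by
  intro L
  induction L with
  | nil => intro d h; exact h
  | cons k L ih =>
    intro d h
    exact ih _ (AllZ_insert h k)

theorem AllZ_empty : AllZ (PySem.Dict.empty : PySem.Dict String (List Int)) := by
  intro p hp
  simp [PySem.Dict.empty] at hp

-- a dict whose values are all [0, 0] is determined by its key list
theorem items_of_AllZ (d : PySem.Dict String (List Int)) (hnd : d.keys.Nodup) (hz : AllZ d) :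
    d.items = d.keys.map (fun k => (k, ([0, 0] : List Int))) := by
  rw [PySem.Dict.items_eq_map_keys d hnd [0, 0]]
  apply List.map_congr_left
  intro k hk
  simp only [PySem.Dict.keys, List.mem_map] at hk
  obtain ⟨p, hp, hpk⟩ := hk
  have hmem : (k, p.2) ∈ d.items := by
    rw [← hpk]; simpa using hp
  rw [PySem.Dict.getD_of_mem_items d hmem hnd [0, 0], hz p hp]

-- redundant keys already present in the set may be dropped from an update
theorem interleave (h : String → String) (g : String → List String) : ∀ (r : List String) (s : PySem.Set String),
    (∀ x ∈ r, h x ∈ s) →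
    PySem.Set.update s (r.flatMap (fun x => h x :: g x)) = PySem.Set.update s (r.flatMap g) := by
  intro r
  induction r with
  | nil => intro s _; rfl
  | cons x r ih =>
    intro s hs
    simp only [List.flatMap_cons, PySem.Set.update_append, PySem.Set.update_cons]
    rw [PySem.Set.add_of_mem (hs x (by simp))]
    apply ih
    intro x' hx'
    exact (PySem.Set.mem_update _ _ _).2 (Or.inl (hs x' (by simp [hx'])))

-- the core: the double-loop key sequence and the tail-pairs key sequence update a set equally
theorem mainSet : ∀ (ks : List String), ks.Nodup → ∀ s : PySem.Set String,
    PySem.Set.update s (LA ks) = PySem.Set.update s (tailPairs ks) := by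
  intro ks
  induction ks with
  | nil => intro _ s; rfl
  | cons a r ih =>
    intro hnd s
    have ha : a ∉ r := (List.nodup_cons.1 hnd).1
    have hr : r.Nodup := (List.nodup_cons.1 hnd).2
    have hblock_a : blockA (a :: r) a = r.map (pvKey a) := by
      unfold blockA
      rw [List.filter_cons]
      have hda : decide (a ≠ a) = false := by simp
      rw [hda, if_neg Bool.false_ne_true]
      congr 1
      apply List.filter_eq_self.2
      intro y hy
      simp only [decide_eq_true_eq]
      intro hay; exact ha (hay ▸ hy)
    have hblock_r : ∀ x ∈ r, blockA (a :: r) x = pvKey x a :: blockA r x := by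
      intro x hx
      unfold blockA
      rw [List.filter_cons]
      have hxa : x ≠ a := fun hxa => ha (hxa ▸ hx)
      simp [hxa]
    calc PySem.Set.update s (LA (a :: r))
        = PySem.Set.update s (blockA (a :: r) a ++ r.flatMap (blockA (a :: r))) := rfl
      _ = PySem.Set.update (PySem.Set.update s (r.map (pvKey a)))
            (r.flatMap (fun x => pvKey x a :: blockA r x)) := by
          rw [hblock_a, PySem.Set.update_append]
          congr 1
          exact List.flatMap_congr hblock_r
      _ = PySem.Set.update (PySem.Set.update s (r.map (pvKey a))) (r.flatMap (blockA r)) := by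
          apply interleave
          intro x hx
          rw [pvKey_comm]
          exact (PySem.Set.mem_update _ _ _).2 (Or.inr (List.mem_map_of_mem hx))
      _ = PySem.Set.update (PySem.Set.update s (r.map (pvKey a))) (tailPairs r) := ih hr _
      _ = PySem.Set.update s (tailPairs (a :: r)) := by
          rw [tailPairs, PySem.Set.update_append]

-- ===== VERDICT (by name: the statement is the Claim_ definition above) =====
theorem hacerMapaParClase_spec : Claim_equal_hacerMapaParClase := by
  intro m _ hpre
  unfold Spec_hacerMapaParClase hacerMapaParClase_alt
  set ks := m.map (fun p => p.1) with hks
  have hnd : ks.Nodup := hpre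
  rw [dedup_fold ks [] (by simpa using hnd)]
  simp only [List.nil_append]
  rw [A_eq, pairsLoop_eq]
  set dA := (LA ks).foldl stepA PySem.Dict.empty with hdA
  set dB := (tailPairs ks).foldl stepB PySem.Dict.empty with hdB
  have hkA : dA.keys = PySem.Set.update [] (LA ks) := by
    rw [hdA, keys_foldA]; rfl
  have hkB : dB.keys = PySem.Set.update [] (tailPairs ks) := by
    rw [hdB, keys_foldB]; rfl
  have hkeys : dA.keys = dB.keys := by
    rw [hkA, hkB, mainSet ks hnd]
  have hndA : dA.keys.Nodup := by
    rw [hkA]; exact PySem.Set.nodup_update _ _ List.nodup_nil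
  have hndB : dB.keys.Nodup := by
    rw [hkB]; exact PySem.Set.nodup_update _ _ List.nodup_nil
  rw [items_of_AllZ dA hndA (AllZ_foldA _ _ AllZ_empty),
      items_of_AllZ dB hndB (AllZ_foldB _ _ AllZ_empty), hkeys]
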